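-- pv_equiv track=rewrite | github.com/pypi-data/pypi-mirror-402 | packages/ras-commander/ras_commander-0.88.6-py3-none-any.whl/ras_commander/geom/GeomBridge.py | _find_htab_lines_range
-- ===== SOURCE A (Python) =====
-- from typing import Union, Optional, List, Dict, Any
--
-- def _find_htab_lines_range(lines: List[str], struct_start_idx: int, struct_end_idx: int) -> tuple:
--     """
--     Find range of existing HTAB lines within a structure block.
--
--     Parameters:
--         lines: List of file lines
--         struct_start_idx: Index where structure starts
--         struct_end_idx: Index where structure ends (exclusive)
--
--     Returns:
--         tuple: (first_htab_idx, last_htab_idx) or (None, None) if no HTAB lines exist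
--     """
--     first_htab_idx = None
--     last_htab_idx = None
--
--     htab_prefixes = [
--         "BC HTab HWMax=",
--         "BC HTab TWMax=",
--         "BC HTab MaxFlow=",
--         "BC Use User HTab Curves=",
--         "BC User HTab FreeFlow(D)=",
--         "BC User HTab Sub Curve(D)=",
--         "BC User HTab Pts/SubCrv(D)="
--     ]
--
--     for i in range(struct_start_idx, struct_end_idx):
--         line = lines[i]
--         for prefix in htab_prefixes:
--             if line.startswith(prefix):
--                 if first_htab_idx is None:
--                     first_htab_idx = i
--                 last_htab_idx = i
--                 break
--
--     return (first_htab_idx, last_htab_idx)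
-- ===== SOURCE B (Python) =====
-- HTAB_PREFIXES = (
--     "BC HTab HWMax=",
--     "BC HTab TWMax=",
--     "BC HTab MaxFlow=",
--     "BC Use User HTab Curves=",
--     "BC User HTab FreeFlow(D)=",
--     "BC User HTab Sub Curve(D)=",
--     "BC User HTab Pts/SubCrv(D)=",
-- )
--
--
-- def _find_htab_lines_range(lines, struct_start_idx, struct_end_idx):
--     first_htab_idx = None
--     for i in range(struct_start_idx, struct_end_idx):
--         if lines[i].startswith(HTAB_PREFIXES):
--             first_htab_idx = i
--             break
--     if first_htab_idx is None:
--         return (None, None)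
--     last_htab_idx = first_htab_idx
--     for i in range(struct_end_idx - 1, first_htab_idx, -1):
--         if lines[i].startswith(HTAB_PREFIXES):
--             last_htab_idx = i
--             break
--     return (first_htab_idx, last_htab_idx)
-- ===== Notes on version B (the rewrite author's own statement) =====
-- stated objective: alternative
-- what changed: Replaces A's single pass that threads a (first,last) accumulator over the whole range with two early-exit directional scans: a forward scan breaking at the first match and a backward scan from end-1 down to it breaking at the last match, with startswith taking a tuple of prefixes.
import Mathlib
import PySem

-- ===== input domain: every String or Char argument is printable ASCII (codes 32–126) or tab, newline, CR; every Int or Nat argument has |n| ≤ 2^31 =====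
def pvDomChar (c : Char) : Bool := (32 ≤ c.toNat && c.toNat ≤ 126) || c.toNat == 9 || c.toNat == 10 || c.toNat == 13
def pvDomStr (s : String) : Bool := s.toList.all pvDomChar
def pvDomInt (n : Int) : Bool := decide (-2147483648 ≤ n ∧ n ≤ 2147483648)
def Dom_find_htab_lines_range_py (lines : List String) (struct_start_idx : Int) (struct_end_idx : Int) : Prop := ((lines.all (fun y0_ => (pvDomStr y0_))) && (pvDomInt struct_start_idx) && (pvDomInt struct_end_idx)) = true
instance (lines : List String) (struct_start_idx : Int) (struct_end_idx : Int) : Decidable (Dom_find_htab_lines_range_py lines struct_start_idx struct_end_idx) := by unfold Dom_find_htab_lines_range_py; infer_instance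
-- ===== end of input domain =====

-- B replaces A's single accumulator pass with two early-exit directional scans (forward for the
-- first HTAB line, backward for the last); same results, a different decomposition, not faster.

-- ===== PORT A =====
def htabPrefixesA : List String := [
  "BC HTab HWMax=",
  "BC HTab TWMax=",
  "BC HTab MaxFlow=",
  "BC Use User HTab Curves=",
  "BC User HTab FreeFlow(D)=",
  "BC User HTab Sub Curve(D)=",
  "BC User HTab Pts/SubCrv(D)="]

-- A's inner `for prefix in htab_prefixes: if line.startswith(prefix): …; break`
def matchA (line : String) : List String → Bool
  | [] => false
  | p :: ps => if PySem.Str.startswith line p then true else matchA line ps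

def find_htab_lines_range_py (lines : List String) (struct_start_idx : Int) (struct_end_idx : Int) : Option Int × Option Int :=
  (PySem.List.pyRange struct_start_idx struct_end_idx 1).foldl
    (fun st i =>
      let line := PySem.List.pyGetD lines i ""   -- lines[i]; IndexError excluded by Pre_
      if matchA line htabPrefixesA then
        ((match st.1 with | none => some i | some _ => st.1), some i)
      else st)
    (none, none)

-- ===== PORT B =====
def htabPrefixesB : List String := [
  "BC HTab HWMax=",
  "BC HTab TWMax=",
  "BC HTab MaxFlow=",
  "BC Use User HTab Curves=",
  "BC User HTab FreeFlow(D)=",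
  "BC User HTab Sub Curve(D)=",
  "BC User HTab Pts/SubCrv(D)="]

-- line.startswith(tuple_of_prefixes)
def startswithAnyB (line : String) (ps : List String) : Bool :=
  ps.any (fun p => PySem.Str.startswith line p)

-- one of B's break-at-first-match scans, over the given index sequence
def scanB (lines : List String) : List Int → Option Int
  | [] => none
  | i :: rest =>
      if startswithAnyB (PySem.List.pyGetD lines i "") htabPrefixesB then some i
      else scanB lines rest

def find_htab_lines_range_py_alt (lines : List String) (struct_start_idx : Int) (struct_end_idx : Int) : Option Int × Option Int :=
  match scanB lines (PySem.List.pyRange struct_start_idx struct_end_idx 1) with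
  | none => (none, none)
  | some f =>
      (some f, some ((scanB lines (PySem.List.pyRange (struct_end_idx - 1) f (-1))).getD f))

-- ===== PRECONDITION & SPEC =====
-- Pre_ excludes exactly the inputs on which A raises IndexError: a nonempty index range that
-- leaves Python's valid index window [-len(lines), len(lines)).
def Pre_find_htab_lines_range_py (lines : List String) (struct_start_idx : Int) (struct_end_idx : Int) : Prop :=
  struct_start_idx < struct_end_idx →
    (-(lines.length : Int) ≤ struct_start_idx ∧ struct_end_idx ≤ (lines.length : Int))
instance (lines : List String) (struct_start_idx : Int) (struct_end_idx : Int) : Decidable (Pre_find_htab_lines_range_py lines struct_start_idx struct_end_idx) := by unfold Pre_find_htab_lines_range_py; infer_instance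
def pvWitness_find_htab_lines_range_py : List String × Int × Int := (["BC HTab HWMax=1", "zz", "BC HTab TWMax=2"], 0, 3)

def Spec_find_htab_lines_range_py (lines : List String) (struct_start_idx : Int) (struct_end_idx : Int) (out : Option Int × Option Int) : Prop := out = find_htab_lines_range_py_alt lines struct_start_idx struct_end_idx
instance (lines : List String) (struct_start_idx : Int) (struct_end_idx : Int) (out : Option Int × Option Int) : Decidable (Spec_find_htab_lines_range_py lines struct_start_idx struct_end_idx out) := by unfold Spec_find_htab_lines_range_py; infer_instance

-- ===== CLAIM (what is proved, stated in full; the proofs are below) =====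
def Claim_equal_find_htab_lines_range_py : Prop := ∀ (lines : List String) (struct_start_idx : Int) (struct_end_idx : Int), Dom_find_htab_lines_range_py lines struct_start_idx struct_end_idx → Pre_find_htab_lines_range_py lines struct_start_idx struct_end_idx → Spec_find_htab_lines_range_py lines struct_start_idx struct_end_idx (find_htab_lines_range_py lines struct_start_idx struct_end_idx)

-- ===== LEMMAS AND PROOFS =====

lemma matchA_eq_any (line : String) (ps : List String) :
    matchA line ps = startswithAnyB line ps := by
  induction ps with
  | nil => simp [matchA, startswithAnyB]
  | cons p ps ih =>
      have hstep : matchA line (p :: ps) = (PySem.Str.startswith line p || matchA line ps) := by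
        simp only [matchA]; cases h : PySem.Str.startswith line p <;> simp [h]
      rw [hstep, ih]; simp [startswithAnyB]

lemma scanB_eq_find? (lines : List String) (R : List Int) :
    scanB lines R = R.find? (fun i => startswithAnyB (PySem.List.pyGetD lines i "") htabPrefixesB) := by
  induction R with
  | nil => simp [scanB]
  | cons i R ih =>
      by_cases h : startswithAnyB (PySem.List.pyGetD lines i "") htabPrefixesB = true <;>
        simp [scanB, h, ih]

-- characterisation of A's accumulator pass over an arbitrary index list
lemma foldA_char (lines : List String) (R : List Int) :
    ∀ (f l : Option Int),
      R.foldl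
        (fun st i =>
          let line := PySem.List.pyGetD lines i ""
          if matchA line htabPrefixesA then
            ((match st.1 with | none => some i | some _ => st.1), some i)
          else st)
        (f, l)
      = (f.or (R.find? (fun i => startswithAnyB (PySem.List.pyGetD lines i "") htabPrefixesB)),
         (R.reverse.find? (fun i => startswithAnyB (PySem.List.pyGetD lines i "") htabPrefixesB)).or l) := by
  induction R with
  | nil => intro f l; simp
  | cons i R ih =>
      intro f l
      by_cases h : startswithAnyB (PySem.List.pyGetD lines i "") htabPrefixesB = true
      · have hm : matchA (PySem.List.pyGetD lines i "") htabPrefixesA = true := by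
          rw [matchA_eq_any]; exact h
        have hfind : List.find? (fun i => startswithAnyB (PySem.List.pyGetD lines i "") htabPrefixesB) (i :: R) = some i :=
          List.find?_cons_of_pos h
        rw [hfind, List.reverse_cons, List.find?_append]
        have h1 : List.find? (fun i => startswithAnyB (PySem.List.pyGetD lines i "") htabPrefixesB) [i] = some i := by
          simp [h]
        rw [h1]
        simp only [List.foldl_cons, hm, if_true]
        cases f <;>
          · rw [ih]
            cases hB : List.find? (fun i => startswithAnyB (PySem.List.pyGetD lines i "") htabPrefixesB) R.reverse <;>
              simp [Option.or]
      · have hm : matchA (PySem.List.pyGetD lines i "") htabPrefixesA = false := by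
          rw [matchA_eq_any]; simpa using h
        have hfind : List.find? (fun i => startswithAnyB (PySem.List.pyGetD lines i "") htabPrefixesB) (i :: R)
            = List.find? (fun i => startswithAnyB (PySem.List.pyGetD lines i "") htabPrefixesB) R :=
          List.find?_cons_of_neg (by simpa using h)
        rw [hfind, List.reverse_cons, List.find?_append]
        have h1 : List.find? (fun i => startswithAnyB (PySem.List.pyGetD lines i "") htabPrefixesB) [i] = none := by
          simp [h]
        rw [h1]
        simp only [List.foldl_cons, hm, Bool.false_eq_true, if_false]
        rw [ih]
        cases hB : List.find? (fun i => startswithAnyB (PySem.List.pyGetD lines i "") htabPrefixesB) R.reverse <;>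
          simp [Option.or]

-- ===== VERDICT (by name: the statement is the Claim_ definition above) =====
theorem find_htab_lines_range_py_spec : Claim_equal_find_htab_lines_range_py := by
  intro lines s e _ _
  unfold Spec_find_htab_lines_range_py find_htab_lines_range_py find_htab_lines_range_py_alt
  rw [foldA_char lines _ none none, scanB_eq_find?]
  cases hF : (PySem.List.pyRange s e 1).find? (fun i => startswithAnyB (PySem.List.pyGetD lines i "") htabPrefixesB) with
  | none =>
      have hRev : (PySem.List.pyRange s e 1).reverse.find? (fun i => startswithAnyB (PySem.List.pyGetD lines i "") htabPrefixesB) = none := by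
        rw [List.find?_eq_none] at *
        intro x hx; exact hF x (List.mem_reverse.mp hx)
      simp [hRev, Option.or]
  | some f =>
      have hpf : startswithAnyB (PySem.List.pyGetD lines f "") htabPrefixesB = true := by
        simpa using List.find?_some hF
      have hf_mem : f ∈ PySem.List.pyRange s e 1 := List.mem_of_find?_eq_some hF
      have hsf : s ≤ f ∧ f < e := (PySem.List.mem_pyRange_one).mp hf_mem
      have hsplit : PySem.List.pyRange s e 1
          = PySem.List.pyRange s (f + 1) 1 ++ PySem.List.pyRange (f + 1) e 1 :=
        PySem.List.pyRange_one_append s (f + 1) e (by omega) (by omega)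
      have hX : PySem.List.pyRange s (f + 1) 1 = PySem.List.pyRange s f 1 ++ [f] :=
        PySem.List.pyRange_one_succ_right (by omega)
      have hY : PySem.List.pyRange (e - 1) f (-1) = (PySem.List.pyRange (f + 1) e 1).reverse := by
        have := PySem.List.pyRange_neg_one_eq_reverse (e - 1) f
        simpa using this
      have hRev : (PySem.List.pyRange s e 1).reverse.find? (fun i => startswithAnyB (PySem.List.pyGetD lines i "") htabPrefixesB)
          = some (((PySem.List.pyRange (f + 1) e 1).reverse.find? (fun i => startswithAnyB (PySem.List.pyGetD lines i "") htabPrefixesB)).getD f) := by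
        rw [hsplit, List.reverse_append, List.find?_append, hX, List.reverse_append]
        cases hB : (PySem.List.pyRange (f + 1) e 1).reverse.find? (fun i => startswithAnyB (PySem.List.pyGetD lines i "") htabPrefixesB) <;>
          simp [hpf]
      simp [scanB_eq_find?, hY, hRev, Option.or]
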